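-- pv_equiv track=rewrite | github.com/Komodo64/Archivos-de-Python | 1-10-25/5.py | usuarios_similares
-- ===== SOURCE A (Python) =====
-- def usuarios_similares(grafo, usuario):
--     # Si el usuario no existe, retornamos diccionario vacío
--     if usuario not in grafo:
--         return {}
--
--     intereses_usuario = grafo[usuario]  # Intereses del usuario objetivo
--     similitudes = {}  # Diccionario para almacenar similitudes
--
--     # Comparamos con cada otro usuario
--     for otro_usuario, intereses_otro in grafo.items():
--         # No comparamos al usuario consigo mismo
--         if otro_usuario != usuario:
--             # Calculamos intersección de intereses (intereses comunes)
--             comunes = intereses_usuario.intersection(intereses_otro)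
--             # Si hay intereses comunes, guardamos la cantidad
--             if comunes:
--                 similitudes[otro_usuario] = len(comunes)
--
--     # Retornamos diccionario ordenado por similitud (mayor a menor)
--     return dict(sorted(similitudes.items(), key=lambda x: x[1], reverse=True))
-- ===== SOURCE B (Python) =====
-- def usuarios_similares(grafo, usuario):
--     if usuario not in grafo:
--         return {}
--     # Inverted index: interest -> users having it, in grafo order
--     indice = {}
--     for u, intereses in grafo.items():
--         for i in intereses:
--             indice.setdefault(i, []).append(u)
--     # Count shared interests by walking the posting lists of the target's interests
--     conteos = {}
--     for i in grafo[usuario]: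
--         for u in indice[i]:
--             if u != usuario:
--                 conteos[u] = conteos.get(u, 0) + 1
--     # Re-emit in grafo order (stable tie-break), then sort by count descending
--     similitudes = {u: conteos[u] for u in grafo if u in conteos}
--     return dict(sorted(similitudes.items(), key=lambda x: x[1], reverse=True))
-- ===== Notes on version B (the rewrite author's own statement) =====
-- stated objective: alternative
-- what changed: Replaces A's per-user set intersections (every user against the target's interest set) by an inverted index interest->users built in one pass, then accumulates shared-interest counts along the posting lists of the target's interests and re-emits them in grafo order before the same descending sort.
import Mathlib
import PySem

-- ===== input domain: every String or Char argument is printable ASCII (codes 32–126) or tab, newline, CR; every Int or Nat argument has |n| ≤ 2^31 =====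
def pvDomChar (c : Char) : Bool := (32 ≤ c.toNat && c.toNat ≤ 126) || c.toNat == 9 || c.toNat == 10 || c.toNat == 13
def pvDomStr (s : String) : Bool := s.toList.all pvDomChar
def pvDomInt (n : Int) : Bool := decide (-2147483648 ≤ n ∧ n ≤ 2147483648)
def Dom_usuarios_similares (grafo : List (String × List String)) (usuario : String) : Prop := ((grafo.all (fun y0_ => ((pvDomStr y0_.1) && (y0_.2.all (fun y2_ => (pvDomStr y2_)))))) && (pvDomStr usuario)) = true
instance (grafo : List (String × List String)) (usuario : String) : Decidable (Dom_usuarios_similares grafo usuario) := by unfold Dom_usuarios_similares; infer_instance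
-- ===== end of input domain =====

-- B replaces A's per-user interest intersections by a single inverted index (interest -> users),
-- accumulating each shared interest once; same return value, including tie order.

-- ===== PORT A =====
-- 'usuario not in grafo' + 'grafo[usuario]' on a Python dict = first (unique) matching key.
def usuarios_similares (grafo : List (String × List String)) (usuario : String) : List (String × Int) :=
  match grafo.find? (fun p => p.1 == usuario) with
  | none => []  -- usuario not in grafo: return {}
  | some pu =>
    let interesesUsuario := pu.2
    let similitudes : PySem.Dict String Int :=
      grafo.foldl (fun sim p =>
        if p.1 ≠ usuario then
          let comunes := PySem.Set.inter interesesUsuario p.2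
          if comunes ≠ [] then sim.insert p.1 (PySem.Set.len comunes) else sim
        else sim) PySem.Dict.empty
    PySem.List.sorted similitudes.items (fun x => x.2) true

-- ===== PORT B =====
def usuarios_similares_alt (grafo : List (String × List String)) (usuario : String) : List (String × Int) :=
  match grafo.find? (fun p => p.1 == usuario) with
  | none => []  -- usuario not in grafo: return {}
  | some pu =>
    let indice : PySem.Dict String (List String) :=
      grafo.foldl (fun d p => p.2.foldl (fun d i => d.insert i (d.getD i [] ++ [p.1])) d) PySem.Dict.empty
    -- Python's indice[i] never misses here (usuario itself posted i), so getD is exact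
    let conteos : PySem.Dict String Int :=
      pu.2.foldl (fun c i => (indice.getD i []).foldl
        (fun c u => if u ≠ usuario then c.insert u (c.getD u 0 + 1) else c) c) PySem.Dict.empty
    let similitudes : PySem.Dict String Int :=
      grafo.foldl (fun s p =>
        match conteos.get? p.1 with
        | some n => s.insert p.1 n
        | none => s) PySem.Dict.empty
    PySem.List.sorted similitudes.items (fun x => x.2) true

-- ===== PRECONDITION & SPEC =====
-- Pre_ only says the input really encodes a Python dict[str, set[str]]: keys pairwise distinct
-- and each interest list duplicate-free; it excludes no input the Python A returns on.
def Pre_usuarios_similares (grafo : List (String × List String)) (usuario : String) : Prop :=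
  (grafo.map Prod.fst).Nodup ∧ ∀ p ∈ grafo, p.2.Nodup
instance (grafo : List (String × List String)) (usuario : String) : Decidable (Pre_usuarios_similares grafo usuario) := by unfold Pre_usuarios_similares; infer_instance
def pvWitness_usuarios_similares : (List (String × List String)) × String :=
  ([("ana", ["rock", "cine"]), ("beto", ["cine", "te"]), ("carla", ["rock", "cine"])], "ana")
def Spec_usuarios_similares (grafo : List (String × List String)) (usuario : String) (out : List (String × Int)) : Prop := out = usuarios_similares_alt grafo usuario
instance (grafo : List (String × List String)) (usuario : String) (out : List (String × Int)) : Decidable (Spec_usuarios_similares grafo usuario out) := by unfold Spec_usuarios_similares; infer_instance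

-- ===== CLAIM (what is proved, stated in full; the proofs are below) =====
def Claim_equal_usuarios_similares : Prop := ∀ (grafo : List (String × List String)) (usuario : String), Dom_usuarios_similares grafo usuario → Pre_usuarios_similares grafo usuario → Spec_usuarios_similares grafo usuario (usuarios_similares grafo usuario)

-- ===== LEMMAS AND PROOFS =====

-- the inner loop of B's index builder: posting list of j gains u exactly when j ∈ ints
theorem pv_idxInner (u : String) (ints : List String) (hnd : ints.Nodup) :
    ∀ (d : PySem.Dict String (List String)) (j : String),
    (ints.foldl (fun d i => d.insert i (d.getD i [] ++ [u])) d).getD j []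
      = d.getD j [] ++ (if j ∈ ints then [u] else []) := by
  induction ints with
  | nil => simp
  | cons i t ih =>
    intro d j
    simp only [List.foldl_cons]
    rw [ih (List.Nodup.of_cons hnd) _ j]
    rw [PySem.Dict.getD_insert]
    by_cases hji : j = i
    · subst hji
      have : j ∉ t := (List.nodup_cons.mp hnd).1
      simp [this]
    · simp [hji, List.mem_cons]

-- B's index characterised: the posting list of j is the users owning j, in grafo order
theorem pv_idxFold (g : List (String × List String)) (hnd : ∀ p ∈ g, p.2.Nodup) :
    ∀ (d : PySem.Dict String (List String)) (j : String),
    (g.foldl (fun d p => p.2.foldl (fun d i => d.insert i (d.getD i [] ++ [p.1])) d) d).getD j []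
      = d.getD j [] ++ ((g.filter (fun p => decide (j ∈ p.2))).map Prod.fst) := by
  induction g with
  | nil => simp
  | cons p t ih =>
    intro d j
    simp only [List.foldl_cons]
    rw [ih (fun q hq => hnd q (List.mem_cons_of_mem _ hq)) _ j]
    rw [pv_idxInner p.1 p.2 (hnd p (List.mem_cons_self ..)) d j]
    by_cases hj : j ∈ p.2 <;> simp [hj]

-- the inner loop of B's counter: v gains the number of its occurrences in L (skipping usuario)
theorem pv_cntInner (usuario : String) (L : List String) :
    ∀ (c : PySem.Dict String Int) (v : String),
    (L.foldl (fun c u => if u ≠ usuario then c.insert u (c.getD u 0 + 1) else c) c).get? v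
      = if v ≠ usuario ∧ v ∈ L then some (c.getD v 0 + (L.count v : Int)) else c.get? v := by
  induction L with
  | nil => simp
  | cons u t ih =>
    intro c v
    simp only [List.foldl_cons]
    by_cases hu : u = usuario
    · subst hu
      simp only [ne_eq, not_true_eq_false, if_false]
      rw [ih c v]
      by_cases hv : v = u
      · subst hv; simp
      · simp [List.mem_cons, hv, Ne.symm hv]
    · simp only [ne_eq, hu, not_false_eq_true, if_true]
      rw [ih _ v]
      by_cases hv : v = u
      · subst hv
        by_cases hvt : v ∈ t
        · simp [hvt, hu, List.count_cons]
          ring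
        · simp [hvt, hu, List.count_eq_zero.mpr hvt]
      · rw [PySem.Dict.getD_insert, PySem.Dict.get?_insert]
        simp [List.mem_cons, hv, Ne.symm hv]

-- B's counter characterised: v's count is the total number of occurrences over all posting lists
theorem pv_cntFold (usuario : String) (E : String → List String) (ints : List String) :
    ∀ (c : PySem.Dict String Int) (v : String),
    (ints.foldl (fun c i => (E i).foldl (fun c u => if u ≠ usuario then c.insert u (c.getD u 0 + 1) else c) c) c).get? v
      = if v ≠ usuario ∧ 0 < (ints.map (fun i => (E i).count v)).sum
        then some (c.getD v 0 + ((ints.map (fun i => (E i).count v)).sum : Int)) else c.get? v := by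
  induction ints with
  | nil => simp
  | cons i t ih =>
    intro c v
    simp only [List.foldl_cons, List.map_cons, List.sum_cons]
    rw [ih _ v]
    rw [PySem.Dict.getD_eq_get?_getD]
    rw [pv_cntInner usuario (E i) c v]
    by_cases hv : v = usuario
    · simp [hv]
    · by_cases hm : v ∈ E i <;> by_cases hst : 0 < (t.map (fun i => (E i).count v)).sum
      · have hc : 0 < (E i).count v := List.count_pos_iff.mpr hm
        simp only [hv, hm, and_true, ne_eq, not_false_eq_true, true_and, if_pos hst,
          if_pos (by omega : 0 < (E i).count v + (t.map (fun i => (E i).count v)).sum)]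
        simp [PySem.Dict.getD_eq_get?_getD]
        ring
      · have hc : 0 < (E i).count v := List.count_pos_iff.mpr hm
        simp only [hv, hm, and_true, ne_eq, not_false_eq_true, true_and, if_neg hst,
          if_pos (by omega : 0 < (E i).count v + (t.map (fun i => (E i).count v)).sum)]
        have h0 : (t.map (fun i => (E i).count v)).sum = 0 := by omega
        simp [h0]
      · have hc : (E i).count v = 0 := List.count_eq_zero.mpr hm
        simp only [hv, hm, and_false, if_false, ne_eq, not_false_eq_true, true_and, if_pos hst, hc,
          if_pos (by omega : 0 < 0 + (t.map (fun i => (E i).count v)).sum)]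
        simp [PySem.Dict.getD_eq_get?_getD]
      · have hc : (E i).count v = 0 := List.count_eq_zero.mpr hm
        simp [hv, hm, hst, hc]

-- with unique keys, p's occurrences in the posting list of i: one iff i ∈ p.2
theorem pv_keyCount (i : String) (p : String × List String) :
    ∀ (g : List (String × List String)), (g.map Prod.fst).Nodup → p ∈ g →
    ((g.filter (fun q => decide (i ∈ q.2))).map Prod.fst).count p.1
      = if i ∈ p.2 then 1 else 0 := by
  intro g
  induction g with
  | nil => simp
  | cons q t ih =>
    intro hnd hp
    have hnd' : (t.map Prod.fst).Nodup := (List.nodup_cons.mp hnd).2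
    have hq1 : q.1 ∉ t.map Prod.fst := (List.nodup_cons.mp hnd).1
    rcases List.mem_cons.mp hp with hpq | hpt
    · subst hpq
      have ht0 : ((t.filter (fun q => decide (i ∈ q.2))).map Prod.fst).count p.1 = 0 := by
        rw [List.count_eq_zero]
        intro hmem
        exact hq1 (by
          rcases List.mem_map.mp hmem with ⟨r, hr, hre⟩
          exact hre ▸ List.mem_map.mpr ⟨r, (List.mem_filter.mp hr).1, rfl⟩)
      by_cases hi : i ∈ p.2 <;> simp [List.filter_cons, hi, ht0]
    · have hne : q.1 ≠ p.1 := by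
        intro h
        exact hq1 (h ▸ List.mem_map.mpr ⟨p, hpt, rfl⟩)
      by_cases hi : i ∈ q.2 <;>
        simp [List.filter_cons, hi, ih hnd' hpt, hne]

-- a 0/1 sum over a list is a filter length
theorem pv_sumIte (l : List String) (P : String → Prop) [DecidablePred P] :
    (l.map (fun i => if P i then (1 : Nat) else 0)).sum = (l.filter (fun i => decide (P i))).length := by
  induction l with
  | nil => rfl
  | cons x t ih => by_cases hx : P x <;> simp [List.filter_cons, hx, ih] <;> omega

-- ===== VERDICT (by name: the statement is the Claim_ definition above) =====
theorem usuarios_similares_spec : Claim_equal_usuarios_similares := by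
  intro grafo usuario _ hpre
  obtain ⟨hk, hv⟩ := hpre
  unfold Spec_usuarios_similares usuarios_similares usuarios_similares_alt
  cases hfind : grafo.find? (fun p => p.1 == usuario) with
  | none => rfl
  | some pu =>
    simp only []
    have hpumem : pu ∈ grafo := List.mem_of_find?_eq_some hfind
    -- the counter's value at any key v
    have hcnt : ∀ v : String,
        (pu.2.foldl (fun c i =>
            ((grafo.foldl (fun d p => p.2.foldl (fun d i => d.insert i (d.getD i [] ++ [p.1])) d)
              PySem.Dict.empty).getD i []).foldl
            (fun c u => if u ≠ usuario then c.insert u (c.getD u 0 + 1) else c) c)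
          PySem.Dict.empty).get? v
        = if v ≠ usuario ∧
            0 < (pu.2.map (fun i =>
              (((grafo.foldl (fun d p => p.2.foldl (fun d i => d.insert i (d.getD i [] ++ [p.1])) d)
                PySem.Dict.empty).getD i [])).count v)).sum
          then some (((pu.2.map (fun i =>
              (((grafo.foldl (fun d p => p.2.foldl (fun d i => d.insert i (d.getD i [] ++ [p.1])) d)
                PySem.Dict.empty).getD i [])).count v)).sum : Int))
          else none := by
      intro v
      have := pv_cntFold usuario
        (fun i => (grafo.foldl (fun d p => p.2.foldl (fun d i => d.insert i (d.getD i [] ++ [p.1])) d)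
          PySem.Dict.empty).getD i []) pu.2 PySem.Dict.empty v
      simpa using this
    -- the total count at an entry p of grafo is the intersection size
    have hS : ∀ p ∈ grafo,
        (pu.2.map (fun i =>
          (((grafo.foldl (fun d p => p.2.foldl (fun d i => d.insert i (d.getD i [] ++ [p.1])) d)
            PySem.Dict.empty).getD i [])).count p.1)).sum
        = (PySem.Set.inter pu.2 p.2).length := by
      intro p hp
      have h1 : ∀ i : String,
          ((grafo.foldl (fun d p => p.2.foldl (fun d i => d.insert i (d.getD i [] ++ [p.1])) d)
            PySem.Dict.empty).getD i []).count p.1 = if i ∈ p.2 then 1 else 0 := by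
        intro i
        rw [pv_idxFold grafo hv PySem.Dict.empty i]
        simp only [PySem.Dict.getD_empty, List.nil_append]
        exact pv_keyCount i p grafo hk hp
      calc (pu.2.map (fun i =>
          (((grafo.foldl (fun d p => p.2.foldl (fun d i => d.insert i (d.getD i [] ++ [p.1])) d)
            PySem.Dict.empty).getD i [])).count p.1)).sum
          = (pu.2.map (fun i => if i ∈ p.2 then 1 else 0)).sum := by
            congr 1; exact List.map_congr_left (fun i _ => h1 i)
        _ = (pu.2.filter (fun i => decide (i ∈ p.2))).length := pv_sumIte pu.2 _
        _ = (PySem.Set.inter pu.2 p.2).length := by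
            show _ = (pu.2.filter (fun x => PySem.Set.contains p.2 x)).length
            congr 1
            exact List.filter_congr (fun i _ => by
              simp [PySem.Set.contains, List.contains_eq_mem])
    -- both similitudes folds equal a common canonical guarded-insert fold
    have hA : grafo.foldl (fun sim p =>
          if p.1 ≠ usuario then
            if PySem.Set.inter pu.2 p.2 ≠ [] then
              sim.insert p.1 (PySem.Set.len (PySem.Set.inter pu.2 p.2) : Int) else sim
          else sim) PySem.Dict.empty
        = grafo.foldl (fun (s : PySem.Dict String Int) p =>
          if (decide (p.1 ≠ usuario) && decide (PySem.Set.inter pu.2 p.2 ≠ [])) then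
            s.insert p.1 (((PySem.Set.inter pu.2 p.2).length : Int)) else s) PySem.Dict.empty := by
      apply PySem.List.foldl_congr_mem
      intro s p _
      by_cases h1 : p.1 = usuario <;> by_cases h2 : PySem.Set.inter pu.2 p.2 = [] <;>
        simp [h1, h2, PySem.Set.len]
    have hB : grafo.foldl (fun (s : PySem.Dict String Int) p =>
          match (pu.2.foldl (fun c i =>
              ((grafo.foldl (fun d p => p.2.foldl (fun d i => d.insert i (d.getD i [] ++ [p.1])) d)
                PySem.Dict.empty).getD i []).foldl
              (fun c u => if u ≠ usuario then c.insert u (c.getD u 0 + 1) else c) c)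
            PySem.Dict.empty).get? p.1 with
          | some n => s.insert p.1 n
          | none => s) PySem.Dict.empty
        = grafo.foldl (fun (s : PySem.Dict String Int) p =>
          if (decide (p.1 ≠ usuario) && decide (PySem.Set.inter pu.2 p.2 ≠ [])) then
            s.insert p.1 (((PySem.Set.inter pu.2 p.2).length : Int)) else s) PySem.Dict.empty := by
      apply PySem.List.foldl_congr_mem
      intro s p hp
      rw [hcnt p.1]
      rw [hS p hp]
      by_cases h1 : p.1 = usuario <;> by_cases h2 : PySem.Set.inter pu.2 p.2 = [] <;>
        simp [h1, h2, List.length_pos_iff]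
    rw [hA, hB]
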